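-- pv_equiv track=rewrite | github.com/stranske/Workflows | tools/post_ci_summary.py | _combine_states
-- ===== SOURCE A (Python) =====
-- from typing import Any, Iterable, List, Mapping, MutableSequence, Sequence, TypedDict
--
-- def _combine_states(states: Iterable[str | None]) -> str:
--     lowered: List[str] = [s.lower() for s in states if isinstance(s, str) and s]
--     if not lowered:
--         return "missing"
--     for candidate in ("failure", "cancelled", "timed_out", "action_required"):
--         if candidate in lowered:
--             return candidate
--     for candidate in ("in_progress", "queued", "waiting", "requested"):
--         if candidate in lowered:
--             return candidate
--     if all(state == "skipped" for state in lowered):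
--         return "skipped"
--     if "success" in lowered:
--         return "success"
--     return lowered[0]
-- ===== SOURCE B (Python) =====
-- _RANK = {
--     "failure": 0, "cancelled": 1, "timed_out": 2, "action_required": 3,
--     "in_progress": 4, "queued": 5, "waiting": 6, "requested": 7,
-- }
--
-- def _combine_states(states):
--     lowered = [s.lower() for s in states if isinstance(s, str) and s]
--     if not lowered:
--         return "missing"
--     best_rank = 8
--     best_name = ""
--     for state in lowered:
--         r = _RANK.get(state, 8)
--         if r < best_rank:
--             best_rank = r
--             best_name = state
--     if best_rank < 8:
--         return best_name
--     if all(state == "skipped" for state in lowered):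
--         return "skipped"
--     if "success" in lowered:
--         return "success"
--     return lowered[0]
-- ===== Notes on version B (the rewrite author's own statement) =====
-- stated objective: alternative
-- what changed: Replaces the eight sequential candidate-membership scans over lowered with a single pass that tracks the minimum priority rank from a prebuilt rank table; the unranked tail (skipped/success/first) is unchanged.
import Mathlib
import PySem

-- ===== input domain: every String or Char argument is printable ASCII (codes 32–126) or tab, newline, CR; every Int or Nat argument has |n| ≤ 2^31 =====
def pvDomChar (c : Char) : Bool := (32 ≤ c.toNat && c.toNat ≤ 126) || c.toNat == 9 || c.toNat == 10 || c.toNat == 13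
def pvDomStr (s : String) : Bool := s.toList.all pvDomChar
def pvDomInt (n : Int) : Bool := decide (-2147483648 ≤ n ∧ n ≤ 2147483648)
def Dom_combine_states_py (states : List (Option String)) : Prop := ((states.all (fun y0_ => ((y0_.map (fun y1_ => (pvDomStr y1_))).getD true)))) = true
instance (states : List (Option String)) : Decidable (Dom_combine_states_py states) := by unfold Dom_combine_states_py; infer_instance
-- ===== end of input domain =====

-- B replaces A's eight sequential candidate-membership scans with one pass tracking the
-- minimum rank from a prebuilt priority table (objective: alternative decomposition, same cost).

-- ===== PORT A =====
-- the shared comprehension [s.lower() for s in states if isinstance(s, str) and s]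
def pvLowered (states : List (Option String)) : List String :=
  states.filterMap (fun o => match o with
    | some s => if s ≠ "" then some (PySem.Str.lower s) else none
    | none => none)

def combine_states_py (states : List (Option String)) : String :=
  let lowered := pvLowered states
  if lowered = [] then "missing"
  else
    match (["failure", "cancelled", "timed_out", "action_required"].find?
            (fun c => lowered.contains c)) with
    | some c => c
    | none =>
      match (["in_progress", "queued", "waiting", "requested"].find?
              (fun c => lowered.contains c)) with
      | some c => c
      | none =>
        if lowered.all (fun st => st == "skipped") then "skipped"
        else if lowered.contains "success" then "success"
        else lowered.headD ""

-- ===== PORT B =====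
-- _RANK.get(state, 8)
def pvRank (s : String) : Nat :=
  if s = "failure" then 0
  else if s = "cancelled" then 1
  else if s = "timed_out" then 2
  else if s = "action_required" then 3
  else if s = "in_progress" then 4
  else if s = "queued" then 5
  else if s = "waiting" then 6
  else if s = "requested" then 7
  else 8

-- one iteration of B's loop body
def pvStep (best : Nat × String) (s : String) : Nat × String :=
  if pvRank s < best.1 then (pvRank s, s) else best

def combine_states_py_alt (states : List (Option String)) : String :=
  let lowered := pvLowered states
  if lowered = [] then "missing"
  else
    let best := lowered.foldl pvStep (8, "")
    if best.1 < 8 then best.2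
    else if lowered.all (fun st => st == "skipped") then "skipped"
    else if lowered.contains "success" then "success"
    else lowered.headD ""

-- ===== PRECONDITION & SPEC =====
def Spec_combine_states_py (states : List (Option String)) (out : String) : Prop := out = combine_states_py_alt states
instance (states : List (Option String)) (out : String) : Decidable (Spec_combine_states_py states out) := by unfold Spec_combine_states_py; infer_instance

-- ===== CLAIM (what is proved, stated in full; the proofs are below) =====
def Claim_equal_combine_states_py : Prop := ∀ (states : List (Option String)), Dom_combine_states_py states → Spec_combine_states_py states (combine_states_py states)

-- ===== LEMMAS AND PROOFS =====

-- the ranked candidate with a given rank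
def pvCand : Nat → String
  | 0 => "failure"
  | 1 => "cancelled"
  | 2 => "timed_out"
  | 3 => "action_required"
  | 4 => "in_progress"
  | 5 => "queued"
  | 6 => "waiting"
  | 7 => "requested"
  | _ => ""

theorem pvRank_cand : ∀ j, j < 8 → pvRank (pvCand j) = j := by decide

theorem cand_of_rank (s : String) (h : pvRank s < 8) : s = pvCand (pvRank s) := by
  unfold pvRank at *
  split_ifs at * <;> simp_all [pvCand]

theorem foldl_step_fst_le (l : List String) : ∀ b : Nat × String, (l.foldl pvStep b).1 ≤ b.1 := by
  induction l with
  | nil => intro b; simp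
  | cons a l ih =>
    intro b
    have h1 := ih (pvStep b a)
    have h2 : (pvStep b a).1 ≤ b.1 := by
      unfold pvStep; split
      · simp; omega
      · simp
    simpa using le_trans h1 h2

theorem foldl_step_le_mem (l : List String) :
    ∀ b : Nat × String, ∀ s ∈ l, (l.foldl pvStep b).1 ≤ pvRank s := by
  induction l with
  | nil => intro b s hs; simp at hs
  | cons a l ih =>
    intro b s hs
    rcases List.mem_cons.mp hs with h | h
    · subst h
      have h2 : (pvStep b s).1 ≤ pvRank s := by
        unfold pvStep; split
        · simp
        · omega
      simpa using le_trans (foldl_step_fst_le l (pvStep b s)) h2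
    · simpa using ih (pvStep b a) s h

theorem foldl_step_eq (l : List String) :
    ∀ b : Nat × String, l.foldl pvStep b = b ∨ ∃ s ∈ l, l.foldl pvStep b = (pvRank s, s) := by
  induction l with
  | nil => intro b; left; rfl
  | cons a l ih =>
    intro b
    rcases ih (pvStep b a) with h | ⟨s, hs, h⟩
    · by_cases hc : pvRank a < b.1
      · right; exact ⟨a, List.mem_cons_self, by simpa [pvStep, hc] using h⟩
      · left; simpa [pvStep, hc] using h
    · right; exact ⟨s, List.mem_cons_of_mem _ hs, by simpa using h⟩

theorem not_mem_cand_of_lt (l : List String) (j : Nat) (hj : j < 8)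
    (h : j < (l.foldl pvStep (8, "")).1) : pvCand j ∉ l := by
  intro hmem
  have := foldl_step_le_mem l (8, "") _ hmem
  rw [pvRank_cand j hj] at this
  omega

theorem find1_some (l : List String) (i : Nat) (hi : i < 4) (hmem : pvCand i ∈ l)
    (hnot : ∀ j, j < i → pvCand j ∉ l) :
    (["failure", "cancelled", "timed_out", "action_required"].find?
      (fun c => l.contains c)) = some (pvCand i) := by
  interval_cases i
  · simp_all [List.find?, pvCand]
  · have n0 := hnot 0 (by omega)
    simp_all [List.find?, pvCand]
  · have n0 := hnot 0 (by omega); have n1 := hnot 1 (by omega)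
    simp_all [List.find?, pvCand]
  · have n0 := hnot 0 (by omega); have n1 := hnot 1 (by omega)
    have n2 := hnot 2 (by omega)
    simp_all [List.find?, pvCand]

theorem find1_none (l : List String) (hnot : ∀ j, j < 4 → pvCand j ∉ l) :
    (["failure", "cancelled", "timed_out", "action_required"].find?
      (fun c => l.contains c)) = none := by
  have n0 := hnot 0 (by omega); have n1 := hnot 1 (by omega)
  have n2 := hnot 2 (by omega); have n3 := hnot 3 (by omega)
  simp_all [List.find?, pvCand]

theorem find2_some (l : List String) (i : Nat) (hi4 : 4 ≤ i) (hi : i < 8) (hmem : pvCand i ∈ l)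
    (hnot : ∀ j, j < i → pvCand j ∉ l) :
    (["in_progress", "queued", "waiting", "requested"].find?
      (fun c => l.contains c)) = some (pvCand i) := by
  interval_cases i
  · simp_all [List.find?, pvCand]
  · have n4 := hnot 4 (by omega)
    simp_all [List.find?, pvCand]
  · have n4 := hnot 4 (by omega); have n5 := hnot 5 (by omega)
    simp_all [List.find?, pvCand]
  · have n4 := hnot 4 (by omega); have n5 := hnot 5 (by omega)
    have n6 := hnot 6 (by omega)
    simp_all [List.find?, pvCand]

theorem find2_none (l : List String) (hnot : ∀ j, 4 ≤ j → j < 8 → pvCand j ∉ l) :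
    (["in_progress", "queued", "waiting", "requested"].find?
      (fun c => l.contains c)) = none := by
  have n4 := hnot 4 (by omega) (by omega); have n5 := hnot 5 (by omega) (by omega)
  have n6 := hnot 6 (by omega) (by omega); have n7 := hnot 7 (by omega) (by omega)
  simp_all [List.find?, pvCand]

theorem combine_states_eq (states : List (Option String)) :
    combine_states_py states = combine_states_py_alt states := by
  unfold combine_states_py combine_states_py_alt
  set l := pvLowered states with hl
  by_cases hnil : l = []
  · simp [hnil]
  · simp only [hnil, if_false]
    set best := l.foldl pvStep (8, "") with hbest
    by_cases hb : best.1 < 8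
    · rcases foldl_step_eq l (8, "") with h | ⟨s, hs, h⟩
      · rw [← hbest] at h; rw [h] at hb; simp at hb
      · rw [← hbest] at h
        have hrank : pvRank s = best.1 := by rw [h]
        have hsc : s = pvCand best.1 := by
          rw [← hrank]; exact cand_of_rank s (hrank ▸ hb)
        have hsnd : best.2 = s := by rw [h]
        have hmem : pvCand best.1 ∈ l := hsc ▸ hs
        have hnot : ∀ j, j < best.1 → pvCand j ∉ l := fun j hj =>
          not_mem_cand_of_lt l j (by omega) (by rw [← hbest]; omega)
        by_cases hi4 : best.1 < 4
        · rw [find1_some l best.1 hi4 hmem hnot]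
          simp [hb, hsnd, hsc]
        · have hnot4 : ∀ j, j < 4 → pvCand j ∉ l := fun j hj => hnot j (by omega)
          rw [find1_none l hnot4,
              find2_some l best.1 (by omega) hb hmem hnot]
          simp [hb, hsnd, hsc]
    · have hnot : ∀ j, j < 8 → pvCand j ∉ l := fun j hj =>
        not_mem_cand_of_lt l j hj (by rw [← hbest]; omega)
      rw [find1_none l (fun j hj => hnot j (by omega)),
          find2_none l (fun j _ hj => hnot j hj)]
      simp [hb]

-- ===== VERDICT (by name: the statement is the Claim_ definition above) =====
theorem combine_states_py_spec : Claim_equal_combine_states_py := by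
  intro states _
  unfold Spec_combine_states_py
  exact combine_states_eq states
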